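-- pv_equiv track=rewrite | github.com/Bigazzon/AoE_2023 | Challenges/03/2023_03.py | check_left_pt2
-- ===== SOURCE A (Python) =====
-- def check_left_pt2(lines, i, j):
--     left = lines[i][max(j - 3, 0) : j]
--     if not left[-1].isdigit():
--         return []
--     else:
--         left_digit = left[-1]
--         for c in left[::-1][1:]:
--             if c.isdigit():
--                 left_digit = c + left_digit
--             else:
--                 break
--     return [int(left_digit)]
-- ===== SOURCE B (Python) =====
-- def check_left_pt2(lines, i, j):
--     left = lines[i][max(j - 3, 0) : j]
--     k = len(left)
--     while k > 0 and left[k - 1].isdigit():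
--         k -= 1
--     return [int(left[k:])] if k < len(left) else []
-- ===== Notes on version B (the rewrite author's own statement) =====
-- stated objective: simpler
-- what changed: Instead of walking the reversed slice and building the number string char-by-char by prepending (with a separate last-char guard and break), B scans indices backwards to find the start of the trailing digit run and converts one slice; the empty/no-digit case falls out of the same index comparison.
import Mathlib
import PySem

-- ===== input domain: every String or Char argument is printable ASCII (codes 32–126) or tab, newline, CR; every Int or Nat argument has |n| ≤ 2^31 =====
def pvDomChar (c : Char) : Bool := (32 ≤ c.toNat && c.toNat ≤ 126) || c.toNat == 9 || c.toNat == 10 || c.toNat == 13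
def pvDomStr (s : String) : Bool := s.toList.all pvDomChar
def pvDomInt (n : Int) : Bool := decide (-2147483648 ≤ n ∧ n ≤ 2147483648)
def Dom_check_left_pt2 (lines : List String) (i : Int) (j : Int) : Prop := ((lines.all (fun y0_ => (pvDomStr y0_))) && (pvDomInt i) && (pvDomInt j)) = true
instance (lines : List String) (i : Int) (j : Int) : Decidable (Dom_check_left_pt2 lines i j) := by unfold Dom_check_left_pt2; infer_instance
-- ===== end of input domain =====

-- B finds the start index of the trailing digit run by a backward index scan and converts one
-- slice, instead of A's char-by-char string prepending loop over the reversed slice (objective: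
-- simpler; same cost).

-- ===== PORT A =====
-- for c in left[::-1][1:]: if c.isdigit(): left_digit = c + left_digit else: break
def pvLoopA : List Char → List Char → List Char
  | [], acc => acc
  | c :: rest, acc => if PySem.Chars.isdigit c then pvLoopA rest (c :: acc) else acc

-- body of A after the slice, on left = lines[i][max(j-3,0):j]
def pvCoreA (left : List Char) : List Int :=
  match PySem.List.pyGet? left (-1) with
  | none => []          -- IndexError on left[-1] (empty slice): excluded by Pre_
  | some lastc =>
    if ¬ PySem.Chars.isdigit lastc then []
    else
      let left_digit := pvLoopA (left.reverse.drop 1) [lastc]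
      match PySem.Int.ofChars? left_digit with
      | some v => [v]
      | none => []      -- unreachable: left_digit is a nonempty digit string

def check_left_pt2 (lines : List String) (i : Int) (j : Int) : List Int :=
  match PySem.List.pyGet? lines i with
  | none => []          -- IndexError on lines[i]: excluded by Pre_
  | some line => pvCoreA (PySem.List.slice line.toList (some (max (j - 3) 0)) (some j))

-- ===== PORT B =====
-- while k > 0 and left[k-1].isdigit(): k -= 1   (left[k-1] is always in range; getD is exact here)
def pvRunStart (left : List Char) : Nat → Nat
  | 0 => 0
  | k + 1 => if PySem.Chars.isdigit (left.getD k ' ') then pvRunStart left k else k + 1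

-- body of B after the slice
def pvCoreB (left : List Char) : List Int :=
  let k := pvRunStart left left.length
  if k < left.length then
    match PySem.Int.ofChars? (left.drop k) with
    | some v => [v]
    | none => []        -- unreachable: nonempty digit string
  else []

def check_left_pt2_alt (lines : List String) (i : Int) (j : Int) : List Int :=
  match PySem.List.pyGet? lines i with
  | none => []          -- IndexError on lines[i]: excluded by Pre_
  | some line => pvCoreB (PySem.List.slice line.toList (some (max (j - 3) 0)) (some j))

-- ===== PRECONDITION & SPEC =====
-- Pre_ holds exactly where A returns: i a valid index and the slice nonempty (else left[-1] raises).
def Pre_check_left_pt2 (lines : List String) (i : Int) (j : Int) : Prop :=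
  PySem.List.slice ((PySem.List.pyGet? lines i).getD "").toList (some (max (j - 3) 0)) (some j) ≠ []
instance (lines : List String) (i : Int) (j : Int) : Decidable (Pre_check_left_pt2 lines i j) := by
  unfold Pre_check_left_pt2; infer_instance

def pvWitness_check_left_pt2 : List String × Int × Int := (["a12b"], 0, 3)

def Spec_check_left_pt2 (lines : List String) (i : Int) (j : Int) (out : List Int) : Prop := out = check_left_pt2_alt lines i j
instance (lines : List String) (i : Int) (j : Int) (out : List Int) : Decidable (Spec_check_left_pt2 lines i j out) := by unfold Spec_check_left_pt2; infer_instance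

-- ===== CLAIM (what is proved, stated in full; the proofs are below) =====
def Claim_equal_check_left_pt2 : Prop := ∀ (lines : List String) (i : Int) (j : Int), Dom_check_left_pt2 lines i j → Pre_check_left_pt2 lines i j → Spec_check_left_pt2 lines i j (check_left_pt2 lines i j)

-- ===== LEMMAS AND PROOFS =====
theorem pvLoopA_eq (cs acc : List Char) :
    pvLoopA cs acc = (cs.takeWhile PySem.Chars.isdigit).reverse ++ acc := by
  induction cs generalizing acc with
  | nil => rfl
  | cons c rest ih =>
    simp only [pvLoopA, List.takeWhile]
    by_cases h : PySem.Chars.isdigit c <;> simp [h, ih]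

theorem pvRunStart_append (ys : List Char) (c : Char) (k : Nat) (hk : k ≤ ys.length) :
    pvRunStart (ys ++ [c]) k = pvRunStart ys k := by
  induction k with
  | zero => rfl
  | succ k ih =>
    have hlt : k < ys.length := hk
    simp only [pvRunStart, List.getD]
    simp only [List.getElem?_append_left hlt, ih (Nat.le_of_lt hlt)]
    rfl

theorem pvRunStart_main (cs : List Char) :
    pvRunStart cs cs.length = cs.length - (cs.reverse.takeWhile PySem.Chars.isdigit).length := by
  induction cs using List.reverseRecOn with
  | nil => rfl
  | append_singleton ys c ih =>
    have hlen : (ys ++ [c]).length = ys.length + 1 := by simp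
    rw [hlen]
    simp only [pvRunStart, List.getD]
    simp only [List.getElem?_concat_length, Option.getD_some]
    by_cases h : PySem.Chars.isdigit c
    · simp only [h, if_true]
      rw [pvRunStart_append ys c ys.length (le_refl _), ih]
      simp [h]
    · simp [h]

theorem takeWhile_len_le (cs : List Char) :
    (cs.reverse.takeWhile PySem.Chars.isdigit).length ≤ cs.length := by
  calc (cs.reverse.takeWhile PySem.Chars.isdigit).length ≤ cs.reverse.length :=
        (List.takeWhile_sublist _).length_le
    _ = cs.length := cs.length_reverse

theorem drop_runStart (cs : List Char) :
    cs.drop (cs.length - (cs.reverse.takeWhile PySem.Chars.isdigit).length)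
      = (cs.reverse.takeWhile PySem.Chars.isdigit).reverse := by
  have htw : cs.reverse.take (cs.reverse.takeWhile PySem.Chars.isdigit).length
      = cs.reverse.takeWhile PySem.Chars.isdigit := by
    obtain ⟨t, ht⟩ := List.takeWhile_prefix (l := cs.reverse) PySem.Chars.isdigit
    have h2 := List.take_left (l₁ := cs.reverse.takeWhile PySem.Chars.isdigit) (l₂ := t)
    rw [ht] at h2; exact h2
  conv_rhs => rw [← htw]
  rw [List.reverse_take, List.reverse_reverse, cs.length_reverse]

theorem pvCore_eq (left : List Char) (hne : left ≠ []) : pvCoreA left = pvCoreB left := by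
  obtain ⟨ys, lastc, rfl⟩ : ∃ ys lastc, left = ys ++ [lastc] := by
    rcases List.eq_nil_or_concat left with h | ⟨ys, b, h⟩
    · exact absurd h hne
    · exact ⟨ys, b, by simpa using h⟩
  have hrev : (ys ++ [lastc]).reverse = lastc :: ys.reverse := by simp
  have hlen : (ys ++ [lastc]).length = ys.length + 1 := by simp
  by_cases h : PySem.Chars.isdigit lastc
  · have htw : (ys ++ [lastc]).reverse.takeWhile PySem.Chars.isdigit
        = lastc :: ys.reverse.takeWhile PySem.Chars.isdigit := by
      rw [hrev, List.takeWhile_cons, if_pos h]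
    have htle := takeWhile_len_le ys
    have hdrop := drop_runStart (ys ++ [lastc])
    rw [htw] at hdrop
    have hA : pvLoopA ((ys ++ [lastc]).reverse.drop 1) [lastc]
        = (ys.reverse.takeWhile PySem.Chars.isdigit).reverse ++ [lastc] := by
      rw [hrev]; simp only [List.drop_succ_cons, List.drop_zero]; exact pvLoopA_eq _ _
    have hk : (ys ++ [lastc]).length
        - (lastc :: ys.reverse.takeWhile PySem.Chars.isdigit).length < (ys ++ [lastc]).length := by
      simp only [List.length_cons, hlen]; omega
    unfold pvCoreA pvCoreB
    rw [PySem.List.pyGet?_neg_one_append_singleton]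
    dsimp only
    rw [if_neg (by simp [h]), pvRunStart_main, htw, if_pos hk, hA, hdrop, List.reverse_cons]
  · have htw0 : (ys ++ [lastc]).reverse.takeWhile PySem.Chars.isdigit = [] := by
      rw [hrev, List.takeWhile_cons, if_neg h]
    unfold pvCoreA pvCoreB
    rw [PySem.List.pyGet?_neg_one_append_singleton]
    dsimp only
    rw [if_pos h, pvRunStart_main, htw0]
    simp

theorem pre_nonempty (lines : List String) (i : Int) (j : Int) (hpre : Pre_check_left_pt2 lines i j) :
    ∃ line, PySem.List.pyGet? lines i = some line ∧
      PySem.List.slice line.toList (some (max (j - 3) 0)) (some j) ≠ [] := by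
  unfold Pre_check_left_pt2 at hpre
  cases hget : PySem.List.pyGet? lines i with
  | none =>
    exfalso; apply hpre
    rw [hget]
    simp [PySem.List.slice]
  | some line =>
    rw [hget] at hpre
    exact ⟨line, rfl, hpre⟩

theorem check_left_pt2_spec : Claim_equal_check_left_pt2 := by
  intro lines i j _hdom hpre
  unfold Spec_check_left_pt2 check_left_pt2 check_left_pt2_alt
  obtain ⟨line, hget, hne⟩ := pre_nonempty lines i j hpre
  rw [hget]
  exact pvCore_eq _ hne
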